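-- pv_equiv track=rewrite | github.com/adagio/advent-of-code | source/day06/modules/part2/medidor.py | __get_distance_sum
-- ===== SOURCE A (Python) =====
-- def __get_distance_sum(point, coords, cota):
--     distance_sum = 0
--     p_x, p_y = point
--     for coord in coords:
--         coord_x, coord_y = coord
--         distance_to_coord = abs(p_x - coord_x) + abs(p_y - coord_y)
--         distance_sum += distance_to_coord
--         if distance_sum > cota:
--             break
--     return distance_sum
-- ===== SOURCE B (Python) =====
-- from itertools import accumulate
--
-- def __get_distance_sum(point, coords, cota):
--     p_x, p_y = point
--     dists = (abs(p_x - cx) + abs(p_y - cy) for (cx, cy) in coords)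
--     sums = list(accumulate(dists))
--     return next((s for s in sums if s > cota), sums[-1] if sums else 0)
-- ===== Notes on version B (the rewrite author's own statement) =====
-- stated objective: alternative
-- what changed: The fused accumulate-and-break loop is replaced by a prefix-sum table built with itertools.accumulate plus a separate search pass (next on the first prefix sum exceeding cota, defaulting to the total).
import Mathlib
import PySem

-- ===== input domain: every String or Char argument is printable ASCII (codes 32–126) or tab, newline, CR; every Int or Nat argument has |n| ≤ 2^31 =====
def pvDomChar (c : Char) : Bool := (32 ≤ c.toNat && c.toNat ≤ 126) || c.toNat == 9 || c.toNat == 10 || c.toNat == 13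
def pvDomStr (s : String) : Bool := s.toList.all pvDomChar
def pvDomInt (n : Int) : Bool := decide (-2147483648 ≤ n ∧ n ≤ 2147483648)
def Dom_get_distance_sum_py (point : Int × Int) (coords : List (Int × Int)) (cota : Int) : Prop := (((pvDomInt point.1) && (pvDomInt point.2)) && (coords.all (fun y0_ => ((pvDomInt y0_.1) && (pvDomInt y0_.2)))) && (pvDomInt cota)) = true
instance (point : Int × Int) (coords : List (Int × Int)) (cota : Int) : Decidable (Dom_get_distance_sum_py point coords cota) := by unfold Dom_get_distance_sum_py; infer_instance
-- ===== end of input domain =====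

-- B replaces A's fused accumulate-and-break loop by a prefix-sum table plus a separate search pass (alternative decomposition, same cost).


-- ===== PORT A =====
-- the for-loop with break, carried as structural recursion over coords with the running sum
def pvLoopA (p_x p_y cota : Int) : List (Int × Int) → Int → Int
  | [], distance_sum => distance_sum
  | coord :: rest, distance_sum =>
    let distance_to_coord := |p_x - coord.1| + |p_y - coord.2|
    let distance_sum' := distance_sum + distance_to_coord
    if distance_sum' > cota then distance_sum' else pvLoopA p_x p_y cota rest distance_sum'

def get_distance_sum_py (point : Int × Int) (coords : List (Int × Int)) (cota : Int) : Int :=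
  pvLoopA point.1 point.2 cota coords 0

-- ===== PORT B =====
-- itertools.accumulate: the list of running prefix sums of dists (no initial element)
def pvAccum (s : Int) : List Int → List Int
  | [] => []
  | d :: rest => (s + d) :: pvAccum (s + d) rest

def get_distance_sum_py_alt (point : Int × Int) (coords : List (Int × Int)) (cota : Int) : Int :=
  let dists := coords.map (fun c => |point.1 - c.1| + |point.2 - c.2|)
  let sums := pvAccum 0 dists
  match sums.find? (fun s => s > cota) with
  | some s => s
  | none => (sums.getLast?).getD 0    -- sums[-1] if sums else 0

-- ===== PRECONDITION & SPEC =====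
def Spec_get_distance_sum_py (point : Int × Int) (coords : List (Int × Int)) (cota : Int) (out : Int) : Prop := out = get_distance_sum_py_alt point coords cota
instance (point : Int × Int) (coords : List (Int × Int)) (cota : Int) (out : Int) : Decidable (Spec_get_distance_sum_py point coords cota out) := by unfold Spec_get_distance_sum_py; infer_instance

-- ===== CLAIM (what is proved, stated in full; the proofs are below) =====
def Claim_equal_get_distance_sum_py : Prop := ∀ (point : Int × Int) (coords : List (Int × Int)) (cota : Int), Dom_get_distance_sum_py point coords cota → Spec_get_distance_sum_py point coords cota (get_distance_sum_py point coords cota)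

-- ===== LEMMAS AND PROOFS =====
-- Loop invariant: for any running sum s, A's break-loop equals the search over B's prefix sums started at s.
theorem pvLoopA_eq_accum (p_x p_y cota : Int) (cs : List (Int × Int)) (s : Int) :
    pvLoopA p_x p_y cota cs s =
      (match (pvAccum s (cs.map (fun c => |p_x - c.1| + |p_y - c.2|))).find? (fun t => t > cota) with
       | some t => t
       | none => ((pvAccum s (cs.map (fun c => |p_x - c.1| + |p_y - c.2|))).getLast?).getD s) := by
  induction cs generalizing s with
  | nil => simp [pvLoopA, pvAccum]
  | cons c rest ih =>
    by_cases h : s + (|p_x - c.1| + |p_y - c.2|) > cota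
    · simp [pvLoopA, pvAccum, h]
    · have hd : (decide (s + (|p_x - c.1| + |p_y - c.2|) > cota)) = false := by
        simpa using h
      simp only [pvLoopA, List.map_cons, pvAccum, List.find?_cons, hd, if_neg h]
      rw [ih]
      cases hf : (pvAccum (s + (|p_x - c.1| + |p_y - c.2|)) (rest.map (fun c => |p_x - c.1| + |p_y - c.2|))).find? (fun t => t > cota) with
      | some t => simp
      | none =>
        simp only []
        cases hr : pvAccum (s + (|p_x - c.1| + |p_y - c.2|)) (rest.map (fun c => |p_x - c.1| + |p_y - c.2|)) with
        | nil => simp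
        | cons a l =>
          cases hl : (a :: l).getLast? with
          | none => simp at hl
          | some t => simp [hl]

-- ===== VERDICT (by name: the statement is the Claim_ definition above) =====
theorem get_distance_sum_py_spec : Claim_equal_get_distance_sum_py := by
  intro point coords cota _
  unfold Spec_get_distance_sum_py get_distance_sum_py get_distance_sum_py_alt
  simpa using pvLoopA_eq_accum point.1 point.2 cota coords 0
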